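-- pv_equiv track=rewrite | github.com/KenMercusLai/checkio | checkio/Scientific Expedition/What is wrong with this family/wrong_family.py | is_family
-- ===== SOURCE A (Python) =====
-- def merge_members(group, member_a, member_b):
--     first_member = second_member = None
--     for i in group:
--         if member_a in i:
--             first_member = i
--         if member_b in i:
--             second_member = i
--     if first_member and second_member:
--         try:
--             group.remove(first_member)
--             group.remove(second_member)
--         except ValueError:
--             pass
--         group.append(list(set(first_member + second_member)))
--         return sorted(group, key=lambda x: len(x), reverse=True)
--     else:
--         return group
--
-- def is_family(tree):
--     all_members = {j: {'father': None, 'son': []} for i in tree for j in i}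
--     member_group = [[i] for i in all_members.keys()]
--
--     for relation in tree:
--         # he is his father and son
--         if len(set(relation)) == 1:
--             return False
--         # someone's father and son are the same person
--         if relation[1] != all_members[relation[0]]['father']:
--             all_members[relation[0]]['son'].append(relation[1])
--         else:
--             return False
--         # someone has multiple father
--         if all_members[relation[1]]['father'] is None:
--             all_members[relation[1]]['father'] = relation[0]
--         else:
--             return False
--         member_group = merge_members(member_group, relation[0], relation[1])
--
--     if len(member_group) != 1:
--         return False
--     return True
-- ===== SOURCE B (Python) =====
-- def is_family(tree):
--     # Label-based union of components (merge smaller class into larger),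
--     # with the same per-relation validation checks as the original.
--     father = {}
--     comp = {}
--     cls = {}
--     n = 0
--     for relation in tree:
--         for member in relation:
--             if member not in comp:
--                 father[member] = None
--                 comp[member] = n
--                 cls[n] = [member]
--                 n += 1
--     for relation in tree:
--         if len(set(relation)) == 1:
--             return False
--         a, b = relation[0], relation[1]
--         if father[a] == b:
--             return False
--         if father[b] is not None:
--             return False
--         father[b] = a
--         ca, cb = comp[a], comp[b]
--         if ca != cb:
--             if len(cls[ca]) < len(cls[cb]):
--                 ca, cb = cb, ca
--             for m in cls[cb]:
--                 comp[m] = ca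
--             cls[ca] = cls[ca] + cls[cb]
--             cls[cb] = []
--             n -= 1
--     return n == 1
-- ===== Notes on version B (the rewrite author's own statement) =====
-- stated objective: faster
-- what changed: A tracks connectivity as a list of member groups, rescanning every group, removing, deduplicating and re-sorting the list on each relation; B keeps a member-to-label dict plus label-to-class lists and on each union relabels the smaller class into the larger, keeping a live class counter, with the same per-relation validation checks.
-- outside the precondition, e.g. on is_family([['A', 'A'], []]): A returns False, B returns False; on is_family([['A', 'B'], []]): A raises IndexError, B raises IndexError
import Mathlib
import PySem

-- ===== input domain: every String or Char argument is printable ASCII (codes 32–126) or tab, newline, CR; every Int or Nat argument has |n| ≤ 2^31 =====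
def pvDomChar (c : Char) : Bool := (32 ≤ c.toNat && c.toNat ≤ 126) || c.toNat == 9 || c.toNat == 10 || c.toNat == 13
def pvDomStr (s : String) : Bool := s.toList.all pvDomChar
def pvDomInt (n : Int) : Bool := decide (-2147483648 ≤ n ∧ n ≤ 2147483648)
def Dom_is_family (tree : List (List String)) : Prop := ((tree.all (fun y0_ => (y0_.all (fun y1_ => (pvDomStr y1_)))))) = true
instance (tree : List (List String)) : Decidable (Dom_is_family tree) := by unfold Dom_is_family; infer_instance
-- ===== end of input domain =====

-- B replaces A's list-of-groups connectivity bookkeeping (scan every group, remove, dedup,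
-- re-sort on each relation) by a member→label dict whose smaller class is relabelled into the
-- larger one on each union; the per-relation validation checks are unchanged.  Objective: faster.
-- Pre_ excludes trees containing an empty relation, where A raises IndexError (B raises too).

-- ===== PORT A =====
-- truthiness of `first_member` / `second_member` (None or a list) in `if first_member and second_member`
def pyTruthyL (o : Option (List String)) : Bool :=
  match o with
  | none => false
  | some l => !l.isEmpty

-- port of merge_members(group, member_a, member_b)
def merge_members (group : List (List String)) (member_a member_b : String) : List (List String) :=
  let fs := group.foldl
    (fun (p : Option (List String) × Option (List String)) i =>
      (if member_a ∈ i then some i else p.1, if member_b ∈ i then some i else p.2))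
    (none, none)
  if pyTruthyL fs.1 && pyTruthyL fs.2 then
    let fm := fs.1.getD []
    let sm := fs.2.getD []
    -- try: group.remove(first_member); group.remove(second_member) except ValueError: pass
    let group1 :=
      match PySem.List.remove? group fm with
      | none => group
      | some g1 =>
        match PySem.List.remove? g1 sm with
        | none => g1
        | some g2 => g2
    -- group.append(list(set(first_member + second_member))); sorted(group, key=len, reverse=True)
    PySem.List.sorted (group1 ++ [PySem.Set.ofList (fm ++ sm)]) (fun x => x.length) true
  else group

-- all_members = {j: {'father': None, 'son': []} for i in tree for j in i}
def aInit (tree : List (List String)) : PySem.Dict String (Option String × List String) :=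
  tree.foldl
    (fun d i => i.foldl (fun d j => d.insert j ((none : Option String), ([] : List String))) d)
    PySem.Dict.empty

-- the `for relation in tree` loop of is_family
def isfLoop (d : PySem.Dict String (Option String × List String)) (group : List (List String)) :
    List (List String) → Bool
  | [] => group.length == 1
  | r :: rest =>
    if (PySem.Set.ofList r).length == 1 then false
    else
      match PySem.List.pyGet? r 0, PySem.List.pyGet? r 1 with
      | some a, some b =>
        match d.get? a with
        | none => false          -- KeyError: unreachable, every member of tree is a key
        | some pa =>
          if some b ≠ pa.1 then  -- relation[1] != all_members[relation[0]]['father']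
            let d1 := d.insert a (pa.1, pa.2 ++ [b])   -- ...['son'].append(relation[1])
            match d1.get? b with
            | none => false      -- KeyError: unreachable
            | some pb =>
              match pb.1 with    -- if all_members[relation[1]]['father'] is None
              | none => isfLoop (d1.insert b (some a, pb.2)) (merge_members group a b) rest
              | some _ => false  -- someone has multiple fathers
          else false
      | _, _ => false            -- IndexError on relation[1]: excluded by Pre_

def is_family (tree : List (List String)) : Bool :=
  let all_members := aInit tree
  let member_group := all_members.keys.map (fun k => [k])
  isfLoop all_members member_group tree

-- ===== PORT B =====
-- first loop of B: register a member (state = (father, comp, cls, n))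
def altRegister
    (st : PySem.Dict String (Option String) × PySem.Dict String Int × PySem.Dict Int (List String) × Int)
    (m : String) :
    PySem.Dict String (Option String) × PySem.Dict String Int × PySem.Dict Int (List String) × Int :=
  if st.2.1.contains m then st
  else (st.1.insert m none, st.2.1.insert m st.2.2.2, st.2.2.1.insert st.2.2.2 [m], st.2.2.2 + 1)

def bInit (tree : List (List String)) :
    PySem.Dict String (Option String) × PySem.Dict String Int × PySem.Dict Int (List String) × Int :=
  tree.foldl (fun st r => r.foldl altRegister st)
    (PySem.Dict.empty, PySem.Dict.empty, PySem.Dict.empty, (0 : Int))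

-- the second `for relation in tree` loop of B
def altLoop (father : PySem.Dict String (Option String)) (comp : PySem.Dict String Int)
    (cls : PySem.Dict Int (List String)) (n : Int) : List (List String) → Bool
  | [] => n == 1
  | r :: rest =>
    if (PySem.Set.ofList r).length == 1 then false
    else
      match PySem.List.pyGet? r 0, PySem.List.pyGet? r 1 with
      | some a, some b =>
        match father.get? a with
        | none => false          -- KeyError: unreachable
        | some fa =>
          if fa = some b then false
          else
            match father.get? b with
            | none => false      -- KeyError: unreachable
            | some fb =>
              match fb with
              | some _ => false
              | none =>
                let father' := father.insert b (some a)
                match comp.get? a, comp.get? b with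
                | some ca0, some cb0 =>
                  if ca0 ≠ cb0 then
                    match cls.get? ca0, cls.get? cb0 with
                    | some la0, some lb0 =>
                      let s := if la0.length < lb0.length then (cb0, ca0, lb0, la0)
                               else (ca0, cb0, la0, lb0)
                      let comp' := s.2.2.2.foldl (fun c m => c.insert m s.1) comp
                      let cls' := (cls.insert s.1 (s.2.2.1 ++ s.2.2.2)).insert s.2.1 []
                      altLoop father' comp' cls' (n - 1) rest
                    | _, _ => false   -- KeyError: unreachable
                  else altLoop father' comp cls n rest
                | _, _ => false      -- KeyError: unreachable
      | _, _ => false              -- IndexError: excluded by Pre_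

def is_family_alt (tree : List (List String)) : Bool :=
  let st := bInit tree
  altLoop st.1 st.2.1 st.2.2.1 st.2.2.2 tree

-- ===== PRECONDITION & SPEC =====
-- Pre_ excludes trees containing an empty relation: when the loop reaches it, `relation[1]`
-- raises IndexError in A (and in B alike); if an earlier relation already fails validation,
-- both A and B return False there identically, so nothing A returns on is claimed wrongly.
def Pre_is_family (tree : List (List String)) : Prop := ∀ r ∈ tree, r ≠ []
instance (tree : List (List String)) : Decidable (Pre_is_family tree) := by
  unfold Pre_is_family; infer_instance

def pvWitness_is_family : List (List String) := [["Adam", "Eve"]]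

def Spec_is_family (tree : List (List String)) (out : Bool) : Prop := out = is_family_alt tree
instance (tree : List (List String)) (out : Bool) : Decidable (Spec_is_family tree out) := by
  unfold Spec_is_family; infer_instance

-- ===== CLAIM (what is proved, stated in full; the proofs are below) =====
def Claim_equal_is_family : Prop :=
  ∀ (tree : List (List String)), Dom_is_family tree → Pre_is_family tree →
    Spec_is_family tree (is_family tree)

-- ===== LEMMAS AND PROOFS =====

-- a fold of constant-value inserts, looked up
theorem pv_get?_foldl_insert_const {ν : Type} (l : List String) (d : PySem.Dict String ν) (v : ν)
    (x : String) :
    (l.foldl (fun d m => d.insert m v) d).get? x = if x ∈ l then some v else d.get? x := by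
  induction l generalizing d with
  | nil => simp
  | cons m t ih =>
    simp only [List.foldl_cons, ih, PySem.Dict.get?_insert, List.mem_cons]
    by_cases hxt : x ∈ t <;> by_cases hxm : x = m <;> simp [hxt, hxm]

-- a nested fold over tree is the fold over the flattened member list
theorem pv_foldl_nested {β : Type} (tree : List (List String)) (f : β → String → β) (init : β) :
    tree.foldl (fun st r => r.foldl f st) init = (tree.flatMap (fun r => r)).foldl f init := by
  induction tree generalizing init with
  | nil => rfl
  | cons r t ih => simp [List.foldl_append, ih]

def flatM (tree : List (List String)) : List String := tree.flatMap (fun r => r)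

-- the `for i in group` scan of merge_members finds nothing
theorem pv_find_none (g : List (List String)) (a : String) (o : Option (List String))
    (h : ∀ i ∈ g, a ∉ i) :
    g.foldl (fun o i => if a ∈ i then some i else o) o = o := by
  induction g generalizing o with
  | nil => rfl
  | cons w t ih =>
    have hw : a ∉ w := h w (by simp)
    simp only [List.foldl_cons, if_neg hw]
    exact ih o (fun i hi => h i (by simp [hi]))

-- ... and finds the unique group containing a
theorem pv_find_eq (g : List (List String)) (a : String) (ga : List String)
    (o : Option (List String)) (hga : ga ∈ g) (ha : a ∈ ga)
    (huniq : ∀ w ∈ g, a ∈ w → w = ga) :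
    g.foldl (fun o i => if a ∈ i then some i else o) o = some ga := by
  induction g generalizing o with
  | nil => simp at hga
  | cons w t ih =>
    by_cases hgat : ga ∈ t
    · simp only [List.foldl_cons]
      apply ih
      · exact hgat
      · exact fun w hw haw => huniq w (by simp [hw]) haw
    · have hwga : w = ga := by
        rcases List.mem_cons.mp hga with h | h
        · exact h.symm
        · exact absurd h hgat
      subst hwga
      simp only [List.foldl_cons, if_pos ha]
      exact pv_find_none t a (some w) (fun i hi hai => hgat (huniq i (by simp [hi]) hai ▸ hi))

-- the paired fold of merge_members splits into two independent folds
theorem pv_find_pair (g : List (List String)) (a b : String)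
    (p : Option (List String) × Option (List String)) :
    g.foldl (fun p i => (if a ∈ i then some i else p.1, if b ∈ i then some i else p.2)) p
      = (g.foldl (fun o i => if a ∈ i then some i else o) p.1,
         g.foldl (fun o i => if b ∈ i then some i else o) p.2) := by
  induction g generalizing p with
  | nil => rfl
  | cons w t ih => simp only [List.foldl_cons, ih]

theorem pv_pyGet0 (a b : String) (r : List String) : PySem.List.pyGet? (a :: b :: r) 0 = some a := by
  simp [PySem.List.pyGet?, PySem.List.pyIdx?]
  rw [if_pos (by omega : (0:Int) ≤ (r.length:Int) + 1)]
  rfl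

theorem pv_pyGet1 (a b : String) (r : List String) : PySem.List.pyGet? (a :: b :: r) 1 = some b := by
  simp [PySem.List.pyGet?, PySem.List.pyIdx?]

theorem pv_ofList_single (a : String) : PySem.Set.ofList [a] = [a] := by
  simp [PySem.Set.ofList, PySem.Set.add]

-- the coupling invariant between A's member_group and B's (comp, cls)
structure GInv (g : List (List String)) (comp : PySem.Dict String Int)
    (cls : PySem.Dict Int (List String)) : Prop where
  ndg : g.Nodup
  gne : ∀ gi ∈ g, gi ≠ []
  disj : ∀ gi ∈ g, ∀ gj ∈ g, ∀ x : String, x ∈ gi → x ∈ gj → gi = gj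
  part : ∀ x y : String,
    (∃ gi ∈ g, x ∈ gi ∧ y ∈ gi) ↔ ∃ l, comp.get? x = some l ∧ comp.get? y = some l
  csound : ∀ l xs, cls.get? l = some xs → ∀ x ∈ xs, comp.get? x = some l
  ccomp : ∀ x l, comp.get? x = some l → ∃ xs, cls.get? l = some xs ∧ x ∈ xs

theorem GInv_perm {g g' : List (List String)} {comp : PySem.Dict String Int}
    {cls : PySem.Dict Int (List String)} (hp : g.Perm g') (h : GInv g comp cls) :
    GInv g' comp cls := by
  refine ⟨hp.nodup_iff.mp h.ndg, fun gi hgi => h.gne gi (hp.mem_iff.mpr hgi),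
    fun gi hgi gj hgj x hx hy => h.disj gi (hp.mem_iff.mpr hgi) gj (hp.mem_iff.mpr hgj) x hx hy,
    fun x y => ?_, h.csound, h.ccomp⟩
  rw [← h.part x y]
  constructor
  · rintro ⟨gi, hgi, hx, hy⟩; exact ⟨gi, hp.mem_iff.mpr hgi, hx, hy⟩
  · rintro ⟨gi, hgi, hx, hy⟩; exact ⟨gi, hp.mem_iff.mp hgi, hx, hy⟩

-- what merge_members computes, up to permutation
theorem merge_members_perm (g : List (List String)) (a b : String) (ga gb : List String)
    (ndg : g.Nodup) (hga : ga ∈ g) (ha : a ∈ ga) (hgb : gb ∈ g) (hb : b ∈ gb)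
    (hua : ∀ w ∈ g, a ∈ w → w = ga) (hub : ∀ w ∈ g, b ∈ w → w = gb) :
    (merge_members g a b).Perm
      ((if ga = gb then g.erase ga else (g.erase ga).erase gb)
        ++ [PySem.Set.ofList (ga ++ gb)]) := by
  unfold merge_members
  simp only [pv_find_pair, pv_find_eq g a ga none hga ha hua, pv_find_eq g b gb none hgb hb hub]
  have hgane : ga.isEmpty = false := by
    rw [List.isEmpty_eq_false_iff]; exact List.ne_nil_of_mem ha
  have hgbne : gb.isEmpty = false := by
    rw [List.isEmpty_eq_false_iff]; exact List.ne_nil_of_mem hb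
  simp only [pyTruthyL, hgane, hgbne, Bool.not_false, Bool.and_self, if_pos, Option.getD_some]
  simp only [PySem.List.remove?_eq_some_erase g ga hga]
  by_cases hgagb : ga = gb
  · subst hgagb
    have hrnone : PySem.List.remove? (g.erase ga) ga = none := by
      rw [PySem.List.remove?_eq_none_iff]; exact ndg.not_mem_erase
    simp only [hrnone, if_true]
    exact PySem.List.sorted_perm _ _ _
  · simp only [PySem.List.remove?_eq_some_erase (g.erase ga) gb ((List.mem_erase_of_ne (fun h => hgagb h.symm)).mpr hgb), if_neg hgagb]
    exact PySem.List.sorted_perm _ _ _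

-- invariant preservation, a and b already in the same group / same label
theorem pv_step_same (g : List (List String)) (comp : PySem.Dict String Int)
    (cls : PySem.Dict Int (List String)) (gab S : List String)
    (hinv : GInv g comp cls) (hgab : gab ∈ g)
    (ndS : S.Nodup) (memS : ∀ x, x ∈ S ↔ x ∈ gab) :
    GInv (g.erase gab ++ [S]) comp cls ∧ (g.erase gab ++ [S]).length = g.length := by
  have hsub : g.erase gab ⊆ g := List.erase_subset
  have hnotin : gab ∉ g.erase gab := hinv.ndg.not_mem_erase
  have hgabne : gab ≠ [] := hinv.gne gab hgab
  obtain ⟨x0, hx0⟩ := List.exists_mem_of_ne_nil gab hgabne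
  have hSne : S ≠ [] := List.ne_nil_of_mem ((memS x0).mpr hx0)
  have hSnotin : S ∉ g.erase gab := by
    intro hS
    have : S = gab := hinv.disj S (hsub hS) gab hgab x0 ((memS x0).mpr hx0) hx0
    exact hnotin (this ▸ hS)
  constructor
  · refine ⟨?_, ?_, ?_, ?_, hinv.csound, hinv.ccomp⟩
    · rw [List.nodup_append]
      exact ⟨hinv.ndg.erase gab, List.nodup_singleton S,
        by intro a ha b hb heq; subst heq; exact hSnotin ((List.mem_singleton.mp hb) ▸ ha)⟩
    · intro gi hgi
      rcases List.mem_append.mp hgi with h | h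
      · exact hinv.gne gi (hsub h)
      · simp at h; exact h ▸ hSne
    · intro gi hgi gj hgj x hx hy
      rcases List.mem_append.mp hgi with h1 | h1 <;> rcases List.mem_append.mp hgj with h2 | h2
      · exact hinv.disj gi (hsub h1) gj (hsub h2) x hx hy
      · simp at h2; subst h2
        exact absurd (hinv.disj gi (hsub h1) gab hgab x hx ((memS x).mp hy) ▸ h1) hnotin
      · simp at h1; subst h1
        exact absurd (hinv.disj gj (hsub h2) gab hgab x hy ((memS x).mp hx) ▸ h2) hnotin
      · simp at h1 h2; rw [h1, h2]
    · intro x y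
      rw [← hinv.part x y]
      constructor
      · rintro ⟨gi, hgi, hx, hy⟩
        rcases List.mem_append.mp hgi with h | h
        · exact ⟨gi, hsub h, hx, hy⟩
        · simp at h; subst h
          exact ⟨gab, hgab, (memS x).mp hx, (memS y).mp hy⟩
      · rintro ⟨gi, hgi, hx, hy⟩
        by_cases hgi' : gi = gab
        · subst hgi'
          exact ⟨S, by simp, (memS x).mpr hx, (memS y).mpr hy⟩
        · exact ⟨gi, List.mem_append.mpr (Or.inl ((List.mem_erase_of_ne hgi').mpr hgi)), hx, hy⟩
  · have h1 : (g.erase gab).length = g.length - 1 := List.length_erase_of_mem hgab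
    have h2 : 0 < g.length := List.length_pos_of_mem hgab
    simp [h1]; omega

-- invariant preservation, a union step: label cv's class (list lv = group gv) is relabelled cu
theorem pv_step_union (g : List (List String)) (comp : PySem.Dict String Int)
    (cls : PySem.Dict Int (List String)) (cu cv : Int) (gu gv lu lv S : List String)
    (hinv : GInv g comp cls)
    (hgu : gu ∈ g) (hgv : gv ∈ g) (hguv : gu ≠ gv)
    (hu : ∀ x, comp.get? x = some cu ↔ x ∈ gu)
    (hv : ∀ x, comp.get? x = some cv ↔ x ∈ gv)
    (hlu : cls.get? cu = some lu) (hlv : cls.get? cv = some lv)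
    (ndS : S.Nodup) (memS : ∀ x, x ∈ S ↔ x ∈ gu ∨ x ∈ gv) :
    GInv ((g.erase gu).erase gv ++ [S]) (lv.foldl (fun c m => c.insert m cu) comp)
        ((cls.insert cu (lu ++ lv)).insert cv []) ∧
    ((g.erase gu).erase gv ++ [S]).length + 1 = g.length ∧
    (∀ x, ((lv.foldl (fun c m => c.insert m cu) comp).get? x).isSome
        = (comp.get? x).isSome) := by
  have hgune : gu ≠ [] := hinv.gne gu hgu
  have hgvne : gv ≠ [] := hinv.gne gv hgv
  obtain ⟨xu, hxu⟩ := List.exists_mem_of_ne_nil gu hgune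
  obtain ⟨xv, hxv⟩ := List.exists_mem_of_ne_nil gv hgvne
  have hcucv : cu ≠ cv := by
    intro h
    have h1 : comp.get? xu = some cu := (hu xu).mpr hxu
    have h2 : xu ∈ gv := (hv xu).mp (h ▸ h1)
    exact hguv (hinv.disj gu hgu gv hgv xu hxu h2)
  -- class lists are the groups, membership-wise
  have hlveq : ∀ x, x ∈ lv ↔ x ∈ gv := by
    intro x
    constructor
    · intro hx; exact (hv x).mp (hinv.csound cv lv hlv x hx)
    · intro hx
      obtain ⟨xs, hxs, hxin⟩ := hinv.ccomp x cv ((hv x).mpr hx)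
      have : xs = lv := by rw [hxs] at hlv; exact Option.some_injective _ hlv
      exact this ▸ hxin
  have hlueq : ∀ x, x ∈ lu ↔ x ∈ gu := by
    intro x
    constructor
    · intro hx; exact (hu x).mp (hinv.csound cu lu hlu x hx)
    · intro hx
      obtain ⟨xs, hxs, hxin⟩ := hinv.ccomp x cu ((hu x).mpr hx)
      have : xs = lu := by rw [hxs] at hlu; exact Option.some_injective _ hlu
      exact this ▸ hxin
  have compGet : ∀ x, (lv.foldl (fun c m => c.insert m cu) comp).get? x
      = if x ∈ gv then some cu else comp.get? x := by
    intro x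
    rw [pv_get?_foldl_insert_const]
    by_cases hx : x ∈ gv
    · rw [if_pos ((hlveq x).mpr hx), if_pos hx]
    · rw [if_neg (fun h => hx ((hlveq x).mp h)), if_neg hx]
  have hguv' : ∀ x, x ∈ gu → x ∈ gv → False := by
    intro x h1 h2; exact hguv (hinv.disj gu hgu gv hgv x h1 h2)
  -- base list facts
  have hgvIn : gv ∈ g.erase gu := (List.mem_erase_of_ne (fun h => hguv h.symm)).mpr hgv
  have hsub1 : g.erase gu ⊆ g := List.erase_subset
  have hsub : (g.erase gu).erase gv ⊆ g := fun x hx => hsub1 (List.erase_subset hx)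
  have hgu_not : gu ∉ (g.erase gu).erase gv := fun h =>
    hinv.ndg.not_mem_erase (List.erase_subset h)
  have hgv_not : gv ∉ (g.erase gu).erase gv := (hinv.ndg.erase gu).not_mem_erase
  have hSne : S ≠ [] := List.ne_nil_of_mem ((memS xu).mpr (Or.inl hxu))
  have hSnotin : S ∉ (g.erase gu).erase gv := by
    intro hS
    rcases (memS xu).mpr (Or.inl hxu) |> fun hxS => hinv.disj S (hsub hS) gu hgu xu hxS hxu with h
    exact hgu_not (h ▸ hS)
  refine ⟨⟨?_, ?_, ?_, ?_, ?_, ?_⟩, ?_, ?_⟩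
  · rw [List.nodup_append]
    exact ⟨(hinv.ndg.erase gu).erase gv, List.nodup_singleton S,
      by intro a ha b hb heq; subst heq; exact hSnotin ((List.mem_singleton.mp hb) ▸ ha)⟩
  · intro gi hgi
    rcases List.mem_append.mp hgi with h | h
    · exact hinv.gne gi (hsub h)
    · simp at h; exact h ▸ hSne
  · intro gi hgi gj hgj x hx hy
    rcases List.mem_append.mp hgi with h1 | h1 <;> rcases List.mem_append.mp hgj with h2 | h2
    · exact hinv.disj gi (hsub h1) gj (hsub h2) x hx hy
    · simp at h2; subst h2
      rcases (memS x).mp hy with h | h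
      · exact absurd (hinv.disj gi (hsub h1) gu hgu x hx h ▸ h1) hgu_not
      · exact absurd (hinv.disj gi (hsub h1) gv hgv x hx h ▸ h1) hgv_not
    · simp at h1; subst h1
      rcases (memS x).mp hx with h | h
      · exact absurd (hinv.disj gj (hsub h2) gu hgu x hy h ▸ h2) hgu_not
      · exact absurd (hinv.disj gj (hsub h2) gv hgv x hy h ▸ h2) hgv_not
    · simp at h1 h2; rw [h1, h2]
  · -- partition correspondence
    intro x y
    constructor
    · rintro ⟨gi, hgi, hx, hy⟩
      rcases List.mem_append.mp hgi with h | h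
      · have hxv : x ∉ gv := fun hxv =>
          hgv_not (hinv.disj gi (hsub h) gv hgv x hx hxv ▸ h)
        have hyv : y ∉ gv := fun hyv =>
          hgv_not (hinv.disj gi (hsub h) gv hgv y hy hyv ▸ h)
        obtain ⟨l, hlx, hly⟩ := (hinv.part x y).mp ⟨gi, hsub h, hx, hy⟩
        exact ⟨l, by rw [compGet, if_neg hxv]; exact hlx, by rw [compGet, if_neg hyv]; exact hly⟩
      · simp at h; subst h
        refine ⟨cu, ?_, ?_⟩
        · rcases (memS x).mp hx with h | h
          · rw [compGet, if_neg (fun h' => hguv' x h h')]; exact (hu x).mpr h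
          · rw [compGet, if_pos h]
        · rcases (memS y).mp hy with h | h
          · rw [compGet, if_neg (fun h' => hguv' y h h')]; exact (hu y).mpr h
          · rw [compGet, if_pos h]
    · rintro ⟨l, hlx, hly⟩
      rw [compGet] at hlx hly
      by_cases hxv : x ∈ gv <;> by_cases hyv : y ∈ gv
      · exact ⟨S, by simp, (memS x).mpr (Or.inr hxv), (memS y).mpr (Or.inr hyv)⟩
      · rw [if_pos hxv] at hlx
        rw [if_neg hyv] at hly
        have hlcu : l = cu := (Option.some_injective _ hlx).symm
        have : y ∈ gu := (hu y).mp (hlcu ▸ hly)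
        exact ⟨S, by simp, (memS x).mpr (Or.inr hxv), (memS y).mpr (Or.inl this)⟩
      · rw [if_neg hxv] at hlx
        rw [if_pos hyv] at hly
        have hlcu : l = cu := (Option.some_injective _ hly).symm
        have : x ∈ gu := (hu x).mp (hlcu ▸ hlx)
        exact ⟨S, by simp, (memS x).mpr (Or.inl this), (memS y).mpr (Or.inr hyv)⟩
      · rw [if_neg hxv] at hlx
        rw [if_neg hyv] at hly
        obtain ⟨gi, hgi, hx, hy⟩ := (hinv.part x y).mpr ⟨l, hlx, hly⟩
        by_cases h1 : gi = gv
        · exact absurd (h1 ▸ hx) hxv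
        by_cases h2 : gi = gu
        · subst h2
          exact ⟨S, by simp, (memS x).mpr (Or.inl hx), (memS y).mpr (Or.inl hy)⟩
        · exact ⟨gi, List.mem_append.mpr (Or.inl
            ((List.mem_erase_of_ne h1).mpr ((List.mem_erase_of_ne h2).mpr hgi))), hx, hy⟩
  · -- csound
    intro l xs hxs x hx
    rw [PySem.Dict.get?_insert] at hxs
    by_cases h1 : l = cv
    · rw [if_pos h1] at hxs
      have hxse : xs = [] := by simpa using hxs.symm
      subst hxse; simp at hx
    rw [if_neg h1, PySem.Dict.get?_insert] at hxs
    by_cases h2 : l = cu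
    · rw [if_pos h2] at hxs
      have hxs' : xs = lu ++ lv := by simpa using hxs.symm
      subst hxs'
      rcases List.mem_append.mp hx with h | h
      · have hxu' : x ∈ gu := (hlueq x).mp h
        rw [compGet, if_neg (fun h' => hguv' x hxu' h'), h2]
        exact (hu x).mpr hxu'
      · rw [compGet, if_pos ((hlveq x).mp h), h2]
    · rw [if_neg h2] at hxs
      have hc := hinv.csound l xs hxs x hx
      have hxv : x ∉ gv := fun h => h1 (Option.some_injective _ (((hv x).mpr h) ▸ hc)).symm
      rw [compGet, if_neg hxv]
      exact hc
  · -- ccomp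
    intro x l hl
    rw [compGet] at hl
    by_cases hxv : x ∈ gv
    · rw [if_pos hxv] at hl
      have hlcu : l = cu := (Option.some_injective _ hl).symm
      subst hlcu
      refine ⟨lu ++ lv, ?_, List.mem_append.mpr (Or.inr ((hlveq x).mpr hxv))⟩
      rw [PySem.Dict.get?_insert, if_neg hcucv, PySem.Dict.get?_insert, if_pos rfl]
    · rw [if_neg hxv] at hl
      by_cases h2 : l = cu
      · subst h2
        refine ⟨lu ++ lv, ?_, List.mem_append.mpr (Or.inl ((hlueq x).mpr ((hu x).mp hl)))⟩
        rw [PySem.Dict.get?_insert, if_neg hcucv, PySem.Dict.get?_insert, if_pos rfl]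
      · have h1 : l ≠ cv := fun h => hxv ((hv x).mp (h ▸ hl))
        obtain ⟨xs, hxs, hxin⟩ := hinv.ccomp x l hl
        refine ⟨xs, ?_, hxin⟩
        rw [PySem.Dict.get?_insert, if_neg h1, PySem.Dict.get?_insert, if_neg h2]
        exact hxs
  · -- length
    have h1 : (g.erase gu).length = g.length - 1 := List.length_erase_of_mem hgu
    have h2 : ((g.erase gu).erase gv).length = (g.erase gu).length - 1 :=
      List.length_erase_of_mem hgvIn
    have h3 : 0 < (g.erase gu).length := List.length_pos_of_mem hgvIn
    simp [h2, h1]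
    omega
  · -- support preserved
    intro x
    rw [compGet]
    by_cases hxv : x ∈ gv
    · rw [if_pos hxv, ((hv x).mpr hxv)]; rfl
    · rw [if_neg hxv]

-- characterisation of A's initial dict
theorem aInit_get (tree : List (List String)) (x : String) :
    (aInit tree).get? x
      = if x ∈ flatM tree then some ((none : Option String), ([] : List String)) else none := by
  unfold aInit
  rw [pv_foldl_nested, pv_get?_foldl_insert_const]
  simp [flatM]

theorem aInit_keys (tree : List (List String)) :
    (aInit tree).keys = PySem.Set.ofList (flatM tree) := by
  unfold aInit
  rw [pv_foldl_nested]
  have h := PySem.Dict.keys_foldl_insert (flatM tree)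
    (fun _ _ => ((none : Option String), ([] : List String))) PySem.Dict.empty
  simp only [PySem.Dict.keys_empty, PySem.Set.update_nil_left] at h
  exact h

-- invariant of B's registration loop
theorem bInit_inv (M : List String) :
    (∀ x, ((M.foldl altRegister (PySem.Dict.empty, PySem.Dict.empty, PySem.Dict.empty, (0:Int))).1.get? x).isSome ↔ x ∈ M) ∧
    (∀ x v, (M.foldl altRegister (PySem.Dict.empty, PySem.Dict.empty, PySem.Dict.empty, (0:Int))).1.get? x = some v → v = none) ∧
    (∀ x, ((M.foldl altRegister (PySem.Dict.empty, PySem.Dict.empty, PySem.Dict.empty, (0:Int))).2.1.get? x).isSome ↔ x ∈ M) ∧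
    (∀ x y l, (M.foldl altRegister (PySem.Dict.empty, PySem.Dict.empty, PySem.Dict.empty, (0:Int))).2.1.get? x = some l →
      (M.foldl altRegister (PySem.Dict.empty, PySem.Dict.empty, PySem.Dict.empty, (0:Int))).2.1.get? y = some l → x = y) ∧
    (∀ x l, (M.foldl altRegister (PySem.Dict.empty, PySem.Dict.empty, PySem.Dict.empty, (0:Int))).2.1.get? x = some l →
      (M.foldl altRegister (PySem.Dict.empty, PySem.Dict.empty, PySem.Dict.empty, (0:Int))).2.2.1.get? l = some [x]) ∧
    (∀ l xs, (M.foldl altRegister (PySem.Dict.empty, PySem.Dict.empty, PySem.Dict.empty, (0:Int))).2.2.1.get? l = some xs →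
      ∃ x, xs = [x] ∧ (M.foldl altRegister (PySem.Dict.empty, PySem.Dict.empty, PySem.Dict.empty, (0:Int))).2.1.get? x = some l) ∧
    (∀ x l, (M.foldl altRegister (PySem.Dict.empty, PySem.Dict.empty, PySem.Dict.empty, (0:Int))).2.1.get? x = some l →
      0 ≤ l ∧ l < (M.foldl altRegister (PySem.Dict.empty, PySem.Dict.empty, PySem.Dict.empty, (0:Int))).2.2.2) ∧
    (M.foldl altRegister (PySem.Dict.empty, PySem.Dict.empty, PySem.Dict.empty, (0:Int))).2.1.keys.Nodup ∧
    (M.foldl altRegister (PySem.Dict.empty, PySem.Dict.empty, PySem.Dict.empty, (0:Int))).2.2.2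
      = ((M.foldl altRegister (PySem.Dict.empty, PySem.Dict.empty, PySem.Dict.empty, (0:Int))).2.1.keys.length : Int) := by
  induction M using List.reverseRecOn with
  | nil => simp [PySem.Dict.get?_empty, PySem.Dict.keys_empty]
  | append_singleton M m ih =>
    obtain ⟨h1, h2, h3, h4, h5, h6, h7, h8, h9⟩ := ih
    rw [List.foldl_append]
    set st := M.foldl altRegister (PySem.Dict.empty, PySem.Dict.empty, PySem.Dict.empty, (0:Int)) with hst
    simp only [List.foldl_cons, List.foldl_nil]
    unfold altRegister
    by_cases hc : st.2.1.contains m = true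
    · have hm : m ∈ M := (h3 m).mp (by rw [← PySem.Dict.contains_eq_isSome_get?]; exact hc)
      rw [if_pos hc]
      refine ⟨?_, h2, ?_, h4, h5, h6, h7, h8, h9⟩
      · intro x
        rw [h1 x, List.mem_append, List.mem_singleton]
        constructor
        · exact Or.inl
        · rintro (h | h)
          · exact h
          · exact h ▸ hm
      · intro x
        rw [h3 x, List.mem_append, List.mem_singleton]
        constructor
        · exact Or.inl
        · rintro (h | h)
          · exact h
          · exact h ▸ hm
    · have hm : m ∉ M := fun h =>
        hc (by rw [PySem.Dict.contains_eq_isSome_get?]; exact (h3 m).mpr h)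
      have hgm : st.2.1.get? m = none := by
        rw [PySem.Dict.contains_eq_isSome_get?] at hc
        exact Option.not_isSome_iff_eq_none.mp (by simpa using hc)
      rw [if_neg hc]
      dsimp only
      have hbound : ∀ x l, st.2.1.get? x = some l → l < st.2.2.2 := fun x l h => (h7 x l h).2
      refine ⟨?_, ?_, ?_, ?_, ?_, ?_, ?_, ?_, ?_⟩
      · intro x
        rw [PySem.Dict.get?_insert, List.mem_append, List.mem_singleton]
        by_cases hx : x = m <;> simp [hx, h1 x, hm]
      · intro x v
        rw [PySem.Dict.get?_insert]
        by_cases hx : x = m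
        · rw [if_pos hx]; intro h; exact (Option.some_injective _ h).symm
        · rw [if_neg hx]; exact h2 x v
      · intro x
        rw [PySem.Dict.get?_insert, List.mem_append, List.mem_singleton]
        by_cases hx : x = m <;> simp [hx, h3 x, hm]
      · intro x y l
        rw [PySem.Dict.get?_insert, PySem.Dict.get?_insert]
        by_cases hx : x = m <;> by_cases hy : y = m
        · rw [hx, hy]; intros; rfl
        · rw [if_pos hx, if_neg hy]
          intro hl hyl
          have hln : l = st.2.2.2 := (Option.some_injective _ hl).symm
          have := hbound y l hyl
          omega
        · rw [if_neg hx, if_pos hy]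
          intro hxl hl
          have hln : l = st.2.2.2 := (Option.some_injective _ hl).symm
          have := hbound x l hxl
          omega
        · rw [if_neg hx, if_neg hy]; exact h4 x y l
      · intro x l
        rw [PySem.Dict.get?_insert, PySem.Dict.get?_insert]
        by_cases hx : x = m
        · rw [if_pos hx]
          intro hl
          have hln : l = st.2.2.2 := (Option.some_injective _ hl).symm
          rw [if_pos hln, hx]
        · rw [if_neg hx]
          intro hxl
          have := hbound x l hxl
          rw [if_neg (by omega : l ≠ st.2.2.2)]
          exact h5 x l hxl
      · intro l xs
        rw [PySem.Dict.get?_insert]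
        by_cases hl : l = st.2.2.2
        · rw [if_pos hl]
          intro h
          refine ⟨m, (Option.some_injective _ h).symm, ?_⟩
          rw [PySem.Dict.get?_insert, if_pos rfl, hl]
        · rw [if_neg hl]
          intro h
          obtain ⟨x, hxs, hxl⟩ := h6 l xs h
          have hx : x ≠ m := fun he => by rw [he, hgm] at hxl; cases hxl
          exact ⟨x, hxs, by rw [PySem.Dict.get?_insert, if_neg hx]; exact hxl⟩
      · intro x l
        rw [PySem.Dict.get?_insert]
        by_cases hx : x = m
        · rw [if_pos hx]
          intro hl
          have hln : l = st.2.2.2 := (Option.some_injective _ hl).symm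
          omega
        · rw [if_neg hx]
          intro hxl
          have := h7 x l hxl
          omega
      · exact PySem.Dict.nodup_keys_insert _ _ _ h8
      · rw [PySem.Dict.keys_insert_of_not_contains _ _ (by simpa using hc)]
        rw [List.length_append, List.length_singleton]
        push_cast
        omega

-- the main simulation: A's loop and B's loop agree under the coupling invariant
theorem loop_eq (rest : List (List String))
    (dA : PySem.Dict String (Option String × List String))
    (g : List (List String)) (fB : PySem.Dict String (Option String))
    (comp : PySem.Dict String Int) (cls : PySem.Dict Int (List String)) (n : Int)
    (hf : ∀ x, (dA.get? x).map Prod.fst = fB.get? x)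
    (hsup : ∀ x, (fB.get? x).isSome = (comp.get? x).isSome)
    (hmem : ∀ r' ∈ rest, ∀ m ∈ r', (comp.get? m).isSome = true)
    (hpre : ∀ r' ∈ rest, r' ≠ [])
    (hinv : GInv g comp cls)
    (cnt : (g.length : Int) = n) :
    isfLoop dA g rest = altLoop fB comp cls n rest := by
  induction rest generalizing dA g fB comp cls n with
  | nil =>
    show (g.length == 1) = (n == 1)
    apply Bool.eq_iff_iff.mpr
    simp only [beq_iff_eq]
    omega
  | cons r rest ih =>
    simp only [isfLoop, altLoop]
    by_cases hone : ((PySem.Set.ofList r).length == 1) = true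
    · rw [if_pos hone, if_pos hone]
    rw [if_neg hone, if_neg hone]
    -- r has at least two entries
    obtain ⟨a, rt, rfl⟩ : ∃ a rt, r = a :: rt := by
      cases r with
      | nil => exact absurd rfl (hpre _ (by simp))
      | cons a rt => exact ⟨a, rt, rfl⟩
    obtain ⟨b, r2, rfl⟩ : ∃ b r2, rt = b :: r2 := by
      cases rt with
      | nil => exact absurd (by rw [pv_ofList_single]; rfl) hone
      | cons b r2 => exact ⟨b, r2, rfl⟩
    rw [pv_pyGet0, pv_pyGet1]
    dsimp only
    have hain : a ∈ a :: b :: r2 := by simp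
    have hbin : b ∈ a :: b :: r2 := by simp
    -- a, b are registered everywhere
    obtain ⟨ca0, hca⟩ := Option.isSome_iff_exists.mp (hmem _ (by simp) a hain)
    obtain ⟨cb0, hcb⟩ := Option.isSome_iff_exists.mp (hmem _ (by simp) b hbin)
    obtain ⟨fa, hfa⟩ := Option.isSome_iff_exists.mp
      (by rw [hsup a, hca]; rfl)
    obtain ⟨fb, hfb⟩ := Option.isSome_iff_exists.mp
      (by rw [hsup b, hcb]; rfl)
    have hmapa : (dA.get? a).map Prod.fst = some fa := by rw [hf a, hfa]
    obtain ⟨pa, hdA, hpa1⟩ := Option.map_eq_some_iff.mp hmapa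
    rw [hdA, hfa]
    dsimp only
    by_cases hfab : fa = some b
    · rw [if_neg (fun h => h ((hpa1.trans hfab).symm)), if_pos hfab]
    rw [if_pos (fun h => hfab (hpa1.symm.trans h.symm)), if_neg hfab]
    -- the son-append insert does not change fathers
    have hf1 : ∀ x, ((dA.insert a (pa.1, pa.2 ++ [b])).get? x).map Prod.fst = fB.get? x := by
      intro x
      rw [PySem.Dict.get?_insert]
      by_cases hx : x = a
      · rw [if_pos hx, hx, hfa, ← hpa1]; rfl
      · rw [if_neg hx]; exact hf x
    have hmapb : ((dA.insert a (pa.1, pa.2 ++ [b])).get? b).map Prod.fst = some fb := by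
      rw [hf1 b, hfb]
    obtain ⟨pb, hdA1, hpb1⟩ := Option.map_eq_some_iff.mp hmapb
    rw [hdA1, hfb]
    dsimp only
    cases fb with
    | some f0 => rw [hpb1]
    | none =>
      rw [hpb1]
      dsimp only
      rw [hca, hcb]
      dsimp only
      -- updated father dicts stay coupled
      have hf2 : ∀ x, (((dA.insert a (pa.1, pa.2 ++ [b])).insert b (some a, pb.2)).get? x).map Prod.fst
          = (fB.insert b (some a)).get? x := by
        intro x
        rw [PySem.Dict.get?_insert (dA.insert a (pa.1, pa.2 ++ [b])) b x,
          PySem.Dict.get?_insert fB b x]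
        by_cases hx : x = b
        · rw [if_pos hx, if_pos hx]; rfl
        · rw [if_neg hx, if_neg hx]; exact hf1 x
      have hsup2 : ∀ x, ((fB.insert b (some a)).get? x).isSome = (comp.get? x).isSome := by
        intro x
        rw [PySem.Dict.get?_insert]
        by_cases hx : x = b
        · rw [if_pos hx, hx, hcb]; rfl
        · rw [if_neg hx]; exact hsup x
      have hmem' : ∀ r' ∈ rest, ∀ m ∈ r', (comp.get? m).isSome = true :=
        fun r' hr' => hmem r' (by simp [hr'])
      have hpre' : ∀ r' ∈ rest, r' ≠ [] :=
        fun r' hr' => hpre r' (by simp [hr'])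
      by_cases hcc : ca0 = cb0
      · -- a and b already share a group / a label
        rw [if_neg (by simpa using hcc)]
        obtain ⟨gab, hgab, hagab, hbgab⟩ := (hinv.part a b).mpr ⟨ca0, hca, hcc ▸ hcb⟩
        have huniqa : ∀ w ∈ g, a ∈ w → w = gab := fun w hw haw =>
          hinv.disj w hw gab hgab a haw hagab
        have huniqb : ∀ w ∈ g, b ∈ w → w = gab := fun w hw hbw =>
          hinv.disj w hw gab hgab b hbw hbgab
        have hperm := merge_members_perm g a b gab gab hinv.ndg hgab hagab hgab hbgab huniqa huniqb
        rw [if_pos rfl] at hperm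
        have step := pv_step_same g comp cls gab (PySem.Set.ofList (gab ++ gab)) hinv hgab
          (PySem.Set.nodup_ofList _) (fun x => by rw [PySem.Set.mem_ofList]; simp)
        apply ih _ _ _ _ _ _ hf2 hsup2 hmem' hpre' (GInv_perm hperm.symm step.1)
        rw [hperm.length_eq, step.2]
        exact cnt
      · -- a union step
        rw [if_pos (by simpa using hcc)]
        obtain ⟨la0, hla0, _⟩ := hinv.ccomp a ca0 hca
        obtain ⟨lb0, hlb0, _⟩ := hinv.ccomp b cb0 hcb
        rw [hla0, hlb0]
        dsimp only
        obtain ⟨ga, hga, haga, -⟩ := (hinv.part a a).mpr ⟨ca0, hca, hca⟩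
        obtain ⟨gb, hgb, hbgb, -⟩ := (hinv.part b b).mpr ⟨cb0, hcb, hcb⟩
        have hgagb : ga ≠ gb := by
          intro he
          obtain ⟨l, hl1, hl2⟩ := (hinv.part a b).mp ⟨gb, hgb, he ▸ haga, hbgb⟩
          rw [hca] at hl1; rw [hcb] at hl2
          exact hcc ((Option.some_injective _ hl1).trans (Option.some_injective _ hl2).symm)
        have hu : ∀ x, comp.get? x = some ca0 ↔ x ∈ ga := by
          intro x
          constructor
          · intro hx
            obtain ⟨gi, hgi, hxgi, hagi⟩ := (hinv.part x a).mpr ⟨ca0, hx, hca⟩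
            exact hinv.disj gi hgi ga hga a hagi haga ▸ hxgi
          · intro hx
            obtain ⟨l, hl1, hl2⟩ := (hinv.part x a).mp ⟨ga, hga, hx, haga⟩
            rw [hca] at hl2
            rw [← Option.some_injective _ hl2] at hl1
            exact hl1
        have hv : ∀ x, comp.get? x = some cb0 ↔ x ∈ gb := by
          intro x
          constructor
          · intro hx
            obtain ⟨gi, hgi, hxgi, hbgi⟩ := (hinv.part x b).mpr ⟨cb0, hx, hcb⟩
            exact hinv.disj gi hgi gb hgb b hbgi hbgb ▸ hxgi
          · intro hx
            obtain ⟨l, hl1, hl2⟩ := (hinv.part x b).mp ⟨gb, hgb, hx, hbgb⟩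
            rw [hcb] at hl2
            rw [← Option.some_injective _ hl2] at hl1
            exact hl1
        have huniqa : ∀ w ∈ g, a ∈ w → w = ga := fun w hw haw =>
          hinv.disj w hw ga hga a haw haga
        have huniqb : ∀ w ∈ g, b ∈ w → w = gb := fun w hw hbw =>
          hinv.disj w hw gb hgb b hbw hbgb
        have hperm := merge_members_perm g a b ga gb hinv.ndg hga haga hgb hbgb huniqa huniqb
        rw [if_neg hgagb] at hperm
        by_cases hsw : la0.length < lb0.length
        · rw [if_pos hsw]
          dsimp only
          have union := pv_step_union g comp cls cb0 ca0 gb ga lb0 la0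
            (PySem.Set.ofList (ga ++ gb)) hinv hgb hga (fun h => hgagb h.symm) hv hu hlb0 hla0
            (PySem.Set.nodup_ofList _)
            (fun x => by rw [PySem.Set.mem_ofList, List.mem_append]; exact Or.comm)
          rw [List.erase_comm] at hperm
          refine ih _ _ _ _ _ _ hf2 (fun x => ?_) (fun r' hr' m hm => ?_) hpre'
            (GInv_perm hperm.symm union.1) ?_
          · rw [union.2.2 x]; exact hsup2 x
          · rw [union.2.2 m]; exact hmem' r' hr' m hm
          · have h1 := hperm.length_eq
            have h2 := union.2.1
            omega
        · rw [if_neg hsw]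
          dsimp only
          have union := pv_step_union g comp cls ca0 cb0 ga gb la0 lb0
            (PySem.Set.ofList (ga ++ gb)) hinv hga hgb hgagb hu hv hla0 hlb0
            (PySem.Set.nodup_ofList _)
            (fun x => by rw [PySem.Set.mem_ofList, List.mem_append])
          refine ih _ _ _ _ _ _ hf2 (fun x => ?_) (fun r' hr' m hm => ?_) hpre'
            (GInv_perm hperm.symm union.1) ?_
          · rw [union.2.2 x]; exact hsup2 x
          · rw [union.2.2 m]; exact hmem' r' hr' m hm
          · have h1 := hperm.length_eq
            have h2 := union.2.1
            omega

-- ===== VERDICT (by name: the statement is the Claim_ definition above) =====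
theorem is_family_spec : Claim_equal_is_family := by
  intro tree _ hpre
  show is_family tree = is_family_alt tree
  rw [show is_family tree
      = isfLoop (aInit tree) ((aInit tree).keys.map (fun k => [k])) tree from rfl]
  rw [show is_family_alt tree
      = altLoop (bInit tree).1 (bInit tree).2.1 (bInit tree).2.2.1 (bInit tree).2.2.2 tree from rfl]
  have hbfold : bInit tree
      = (flatM tree).foldl altRegister (PySem.Dict.empty, PySem.Dict.empty, PySem.Dict.empty, (0:Int)) := by
    unfold bInit flatM
    exact pv_foldl_nested tree altRegister _
  rw [hbfold]
  obtain ⟨h1, h2, h3, h4, h5, h6, h7, h8, h9⟩ := bInit_inv (flatM tree)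
  set st := (flatM tree).foldl altRegister (PySem.Dict.empty, PySem.Dict.empty, PySem.Dict.empty, (0:Int)) with hst
  -- the three initial father/comp dictionaries have the same support (the tree's members)
  have hfB : ∀ x, st.1.get? x = if x ∈ flatM tree then some none else none := by
    intro x
    by_cases hx : x ∈ flatM tree
    · obtain ⟨v, hv⟩ := Option.isSome_iff_exists.mp ((h1 x).mpr hx)
      rw [if_pos hx, hv, h2 x v hv]
    · rw [if_neg hx]
      exact Option.not_isSome_iff_eq_none.mp (fun h => hx ((h1 x).mp h))
  have hf : ∀ x, ((aInit tree).get? x).map Prod.fst = st.1.get? x := by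
    intro x
    rw [aInit_get, hfB]
    by_cases hx : x ∈ flatM tree
    · rw [if_pos hx, if_pos hx]; rfl
    · rw [if_neg hx, if_neg hx]; rfl
  have hsup : ∀ x, (st.1.get? x).isSome = (st.2.1.get? x).isSome := by
    intro x
    apply Bool.eq_iff_iff.mpr
    rw [h1 x, h3 x]
  have hmem : ∀ r ∈ tree, ∀ m ∈ r, (st.2.1.get? m).isSome = true := by
    intro r hr m hm
    exact (h3 m).mpr (List.mem_flatMap.mpr ⟨r, hr, hm⟩)
  -- initial coupling invariant
  have hkeys : (aInit tree).keys = PySem.Set.ofList (flatM tree) := aInit_keys tree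
  have hmemK : ∀ x : String, [x] ∈ (aInit tree).keys.map (fun k => [k]) ↔ x ∈ flatM tree := by
    intro x
    rw [hkeys, List.mem_map]
    constructor
    · rintro ⟨k, hk, he⟩
      obtain rfl : k = x := by simpa using he
      exact (PySem.Set.mem_ofList _ _).mp hk
    · intro hx
      exact ⟨x, (PySem.Set.mem_ofList _ _).mpr hx, rfl⟩
  have hshape : ∀ gi ∈ (aInit tree).keys.map (fun k => [k]), ∃ k, gi = [k] := by
    intro gi hgi
    obtain ⟨k, _, he⟩ := List.mem_map.mp hgi
    exact ⟨k, he.symm⟩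
  have hinv : GInv ((aInit tree).keys.map (fun k => [k])) st.2.1 st.2.2.1 := by
    refine ⟨?_, ?_, ?_, ?_, ?_, ?_⟩
    · rw [hkeys]
      exact (PySem.Set.nodup_ofList _).map (fun x y h => by simpa using h)
    · intro gi hgi
      obtain ⟨k, rfl⟩ := hshape gi hgi
      simp
    · intro gi hgi gj hgj x hx hy
      obtain ⟨k, rfl⟩ := hshape gi hgi
      obtain ⟨k', rfl⟩ := hshape gj hgj
      obtain rfl : x = k := by simpa using hx
      obtain rfl : x = k' := by simpa using hy
      rfl
    · intro x y
      constructor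
      · rintro ⟨gi, hgi, hx, hy⟩
        obtain ⟨k, rfl⟩ := hshape gi hgi
        have hxk : x = k := by simpa using hx
        have hyk : y = k := by simpa using hy
        obtain ⟨l, hl⟩ := Option.isSome_iff_exists.mp ((h3 k).mpr ((hmemK k).mp hgi))
        exact ⟨l, by rw [hxk]; exact hl, by rw [hyk]; exact hl⟩
      · rintro ⟨l, hx, hy⟩
        obtain rfl : x = y := h4 x y l hx hy
        have hxM : x ∈ flatM tree := (h3 x).mp (by rw [hx]; rfl)
        exact ⟨[x], (hmemK x).mpr hxM, by simp, by simp⟩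
    · intro l xs hxs x hx
      obtain ⟨x0, rfl, hx0⟩ := h6 l xs hxs
      obtain rfl : x = x0 := by simpa using hx
      exact hx0
    · intro x l hl
      exact ⟨[x], h5 x l hl, by simp⟩
  have hcnt : ((((aInit tree).keys.map (fun k => [k])).length : Nat) : Int) = st.2.2.2 := by
    have hpm : st.2.1.keys.Perm (PySem.Set.ofList (flatM tree)) := by
      refine (List.perm_ext_iff_of_nodup h8 (PySem.Set.nodup_ofList _)).mpr (fun x => ?_)
      rw [PySem.Set.mem_ofList, ← h3 x]
      constructor
      · intro hx
        rw [Option.isSome_iff_ne_none]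
        exact fun h => (PySem.Dict.get?_eq_none_iff_not_mem_keys st.2.1 x).mp h hx
      · intro hx
        by_contra hk
        rw [(PySem.Dict.get?_eq_none_iff_not_mem_keys st.2.1 x).mpr hk] at hx
        exact Bool.false_ne_true hx
    rw [List.length_map, hkeys, ← hpm.length_eq, h9]
  exact loop_eq tree (aInit tree) _ st.1 st.2.1 st.2.2.1 st.2.2.2 hf hsup hmem hpre hinv hcnt
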